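-- pv_equiv track=rewrite | github.com/Santobert/Mathgame | main.py | generate
-- ===== SOURCE A (Python) =====
-- from typing import List
--
-- def generate(highest: int = 18) -> List[int]:
--     if highest > 99:
--         raise Exception("Max values above 99 are not supported")
--
--     result = []
--     for i in range(1, highest + 1):
--         mod = i % 10
--         div = i // 10
--
--         if mod == 0:
--             continue
--
--         if div != 0:
--             result.append(div)
--
--         result.append(mod)
--
--     return result
-- ===== SOURCE B (Python) =====
-- from typing import List
--
-- def generate(highest: int = 18) -> List[int]:
--     if highest > 99:
--         raise Exception("Max values above 99 are not supported")
--
--     result = []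
--     for t in range(0, highest // 10 + 1):
--         for u in range(1, 10):
--             i = t * 10 + u
--             if i <= highest:
--                 if t != 0:
--                     result.append(t)
--                 result.append(u)
--     return result
-- ===== Notes on version B (the rewrite author's own statement) =====
-- stated objective: alternative
-- what changed: Replaces the flat 1..highest scan with mod/div per element by a tens-by-units grid walk (outer tens digit, inner units digit) that appends the digits directly without any division or remainder.
import Mathlib
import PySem

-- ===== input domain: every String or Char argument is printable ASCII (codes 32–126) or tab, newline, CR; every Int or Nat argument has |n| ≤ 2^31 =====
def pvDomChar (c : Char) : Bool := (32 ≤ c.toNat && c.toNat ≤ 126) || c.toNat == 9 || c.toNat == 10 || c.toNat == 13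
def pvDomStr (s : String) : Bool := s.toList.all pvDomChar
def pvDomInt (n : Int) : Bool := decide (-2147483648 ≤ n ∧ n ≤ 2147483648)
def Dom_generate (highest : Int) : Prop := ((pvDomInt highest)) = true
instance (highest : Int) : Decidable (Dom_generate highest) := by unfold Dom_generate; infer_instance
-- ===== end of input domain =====

-- B walks a tens-digit × units-digit grid and appends the digits directly, instead of A's
-- flat 1..highest scan computing i % 10 and i // 10 for each i (objective: alternative).

-- ===== PORT A =====
def generate (highest : Int) : List Int :=
  -- 'if highest > 99: raise' — raising inputs are excluded by Pre_generate; the port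
  -- returns [] there (unclaimed region).
  if highest > 99 then []
  else
    (PySem.List.pyRange 1 (highest + 1) 1).foldl (fun result i =>
      let mod := PySem.Int.mod i 10
      let div := PySem.Int.floordiv i 10
      if mod == 0 then result
      else (if div != 0 then result ++ [div] else result) ++ [mod]) []

-- ===== PORT B =====
def generate_alt (highest : Int) : List Int :=
  if highest > 99 then []
  else
    (PySem.List.pyRange 0 (PySem.Int.floordiv highest 10 + 1) 1).foldl (fun result t =>
      (PySem.List.pyRange 1 10 1).foldl (fun result u =>
        let i := t * 10 + u
        if i ≤ highest then
          (if t != 0 then result ++ [t] else result) ++ [u]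
        else result) result) []

-- ===== PRECONDITION & SPEC =====
-- Pre_ excludes exactly the inputs (highest > 99) on which the Python A raises.
def Pre_generate (highest : Int) : Prop := highest ≤ 99
instance (highest : Int) : Decidable (Pre_generate highest) := by unfold Pre_generate; infer_instance
def pvWitness_generate : Int := (18)

def Spec_generate (highest : Int) (out : List Int) : Prop := out = generate_alt highest
instance (highest : Int) (out : List Int) : Decidable (Spec_generate highest out) := by unfold Spec_generate; infer_instance

-- ===== CLAIM (what is proved, stated in full; the proofs are below) =====
def Claim_equal_generate : Prop := ∀ (highest : Int), Dom_generate highest → Pre_generate highest → Spec_generate highest (generate highest)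

-- ===== LEMMAS AND PROOFS =====

-- the finite core: the two programs agree on every highest in [0, 99]
set_option maxRecDepth 4000 in
theorem agree_Icc : ∀ h ∈ Finset.Icc (0 : Int) 99, generate h = generate_alt h := by decide

theorem fdiv_bound {h : Int} (hneg : h ≤ -1) : PySem.Int.floordiv h 10 + 1 ≤ 0 := by
  have hd : Int.fdiv h 10 = h / 10 - if 0 ≤ (10:Int) ∨ (10:Int) ∣ h then 0 else 1 :=
    Int.fdiv_eq_ediv (a := h) (b := 10)
  simp at hd
  simp [PySem.Int.floordiv]
  omega

theorem agree_neg {h : Int} (hneg : h ≤ -1) : generate h = generate_alt h := by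
  unfold generate generate_alt
  rw [PySem.List.pyRange_one_eq_nil (by omega), PySem.List.pyRange_one_eq_nil (fdiv_bound hneg)]
  simp

-- ===== VERDICT (by name: the statement is the Claim_ definition above) =====
theorem generate_spec : Claim_equal_generate := by
  intro h _ hpre
  unfold Spec_generate
  by_cases hc : h ≤ -1
  · exact agree_neg hc
  · exact agree_Icc h (Finset.mem_Icc.mpr ⟨by omega, hpre⟩)
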